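-- pv_equiv track=rewrite | github.com/Arsenho/2D-Sequence-Alignment | utils.py | dc_matrice_func
-- ===== SOURCE A (Python) =====
-- def del_func(char):
--     return 1
--
-- def dc_matrice_func(x):
--     motif = x
--     assert isinstance(motif, list)
--     assert isinstance(motif[0], str)
--
--     dc_matrix = []
--
--     row = len(motif)
--     column = len(motif[0])
--
--     # Initializing the scores list
--     for i in range(row):
--         inter = []
--         for j in range(column):
--             inter.append(0)
--         dc_matrix.append(inter)
--
--     for i in range(0, row):
--         for j in range(0, column):
--             step = 0
--             for p in range(i):
--                 substring = motif[p][j]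
--                 step += del_func(substring)
--             dc_matrix[i][j] = step
--
--     return dc_matrix
-- ===== SOURCE B (Python) =====
-- def dc_matrice_func(x):
--     motif = x
--     assert isinstance(motif, list)
--     assert isinstance(motif[0], str)
--     column = len(motif[0])
--     result = []
--     prev = [0] * column
--     for _ in motif:
--         result.append(prev)
--         prev = [v + 1 for v in prev]
--     return result
-- ===== Notes on version B (the rewrite author's own statement) =====
-- stated objective: faster
-- what changed: Replaces the triple nested loop (re-summing del_func over all previous rows for every cell) with a single forward pass that appends the running row vector and derives the next row by adding 1 to each element.
import Mathlib
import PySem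

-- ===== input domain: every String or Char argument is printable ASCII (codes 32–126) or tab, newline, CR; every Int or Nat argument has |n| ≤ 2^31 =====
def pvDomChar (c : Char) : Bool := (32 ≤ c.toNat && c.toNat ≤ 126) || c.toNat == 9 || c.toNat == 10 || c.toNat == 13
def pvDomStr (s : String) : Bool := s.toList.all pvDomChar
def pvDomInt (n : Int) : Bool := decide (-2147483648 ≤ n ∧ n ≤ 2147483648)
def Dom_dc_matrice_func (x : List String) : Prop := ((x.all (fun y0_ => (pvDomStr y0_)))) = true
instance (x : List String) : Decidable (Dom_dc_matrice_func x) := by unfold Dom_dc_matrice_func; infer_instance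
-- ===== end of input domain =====

-- B replaces A's per-cell re-summation over all previous rows by a single pass that reuses the previous row (objective: faster).


-- ===== PORT A =====
def del_func (_char : Char) : Int := 1

-- Literal transliteration of A: build a row×column zero matrix by appending, then for each
-- cell (i,j) recompute step by summing del_func over motif[p][j] for p < i and store it.
-- Out-of-range indexing uses getD defaults; Pre_ excludes exactly the inputs where Python raises.
def dc_matrice_func (x : List String) : List (List Int) :=
  let motif := x
  let row := motif.length
  let column := (motif.headD "").toList.length
  let dc_matrix : List (List Int) :=
    (List.range row).foldl (fun dc _i =>
      dc ++ [(List.range column).foldl (fun inter _j => inter ++ [(0 : Int)]) []]) []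
  (List.range row).foldl (fun dc i =>
    (List.range column).foldl (fun dc j =>
      dc.set i ((dc.getD i []).set j
        ((List.range i).foldl (fun step p =>
          step + del_func ((motif.getD p "").toList.getD j ' ')) 0))) dc) dc_matrix

-- ===== PORT B =====
-- Transliteration of B: single pass; append the running row, then bump every entry by 1.
def dc_matrice_func_alt (x : List String) : List (List Int) :=
  let motif := x
  let column := (motif.headD "").toList.length
  (motif.foldl
    (fun (st : List (List Int) × List Int) _ => (st.1 ++ [st.2], st.2.map (fun v => v + 1)))
    ([], List.replicate column (0 : Int))).1

-- ===== PRECONDITION & SPEC =====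
-- Pre_ excludes exactly the inputs where Python A raises IndexError: the empty list
-- (motif[0]) and lists where some non-last string is shorter than the first string
-- (motif[p][j] is read for p < row-1 and j up to len(motif[0])).
def Pre_dc_matrice_func (x : List String) : Prop :=
  x ≠ [] ∧ ∀ s ∈ x.dropLast, (x.headD "").toList.length ≤ s.toList.length
instance (x : List String) : Decidable (Pre_dc_matrice_func x) := by
  unfold Pre_dc_matrice_func; infer_instance
def pvWitness_dc_matrice_func : List String := ["ab", "cd", "e"]

def Spec_dc_matrice_func (x : List String) (out : List (List Int)) : Prop := out = dc_matrice_func_alt x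
instance (x : List String) (out : List (List Int)) : Decidable (Spec_dc_matrice_func x out) := by unfold Spec_dc_matrice_func; infer_instance

-- ===== CLAIM (what is proved, stated in full; the proofs are below) =====
def Claim_equal_dc_matrice_func : Prop := ∀ (x : List String), Dom_dc_matrice_func x → Pre_dc_matrice_func x → Spec_dc_matrice_func x (dc_matrice_func x)

-- ===== LEMMAS AND PROOFS =====

-- The canonical value both ports compute: row i is `replicate column i`.
def pvMk (row column : Nat) : List (List Int) :=
  (List.range row).map (fun (i : Nat) => List.replicate column (i : Int))

theorem pvStep (i : Nat) :
    (List.range i).foldl (fun s (_ : Nat) => s + 1) (0 : Int) = (i : Int) := by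
  induction i with
  | zero => simp
  | succ n ih => simp [List.range_succ, ih]

theorem pvSetRow (v : Int) : ∀ (k : Nat) (r : List Int), k ≤ r.length →
    (List.range k).foldl (fun r j => r.set j v) r = List.replicate k v ++ r.drop k := by
  intro k
  induction k with
  | zero => intro r _; simp
  | succ n ih =>
    intro r hk
    rw [List.range_succ, List.foldl_append, List.foldl_cons, List.foldl_nil,
      ih r (Nat.le_of_succ_le hk)]
    obtain ⟨a, t, ht⟩ : ∃ a t, r.drop n = a :: t := by
      cases h : r.drop n with
      | nil => exfalso; have := List.drop_eq_nil_iff.mp h; omega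
      | cons a t => exact ⟨a, t, rfl⟩
    have hdrop : r.drop (n + 1) = t := by
      have h1 : (r.drop n).drop 1 = r.drop (n + 1) := List.drop_drop
      rw [ht] at h1
      simpa using h1.symm
    rw [ht, hdrop]
    simp [List.replicate_succ']

theorem pvInner (v : Nat → Int) (i : Nat) : ∀ (column : Nat) (dc : List (List Int)), i < dc.length →
    (List.range column).foldl (fun dc j => dc.set i ((dc.getD i []).set j (v j))) dc =
      dc.set i ((List.range column).foldl (fun r j => r.set j (v j)) (dc.getD i [])) := by
  intro column
  induction column with
  | zero => intro dc hi; simp [List.getD, List.getElem?_eq_getElem hi]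
  | succ n ih =>
    intro dc hi
    rw [List.range_succ, List.foldl_append, List.foldl_append, List.foldl_cons, List.foldl_nil,
      List.foldl_cons, List.foldl_nil, ih dc hi]
    have hget : (dc.set i ((List.range n).foldl (fun r j => r.set j (v j)) (dc.getD i []))).getD i []
        = (List.range n).foldl (fun r j => r.set j (v j)) (dc.getD i []) := by
      simp [List.getD, hi]
    rw [hget, List.set_set]

theorem pvInit (row column : Nat) :
    (List.range row).foldl (fun dc _ =>
        dc ++ [(List.range column).foldl (fun inter _ => inter ++ [(0 : Int)]) []]) [] =
      List.replicate row (List.replicate column 0) := by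
  induction row with
  | zero => simp
  | succ n ih => simp [List.range_succ, ih, List.replicate_succ']

theorem pvMk_succ (n column : Nat) :
    pvMk (n+1) column = pvMk n column ++ [List.replicate column (n : Int)] := by
  simp [pvMk, List.range_succ]

theorem pvOuter (column : Nat) : ∀ (m row : Nat), m ≤ row →
    (List.range m).foldl
      (fun dc i => (List.range column).foldl
        (fun dc j => dc.set i ((dc.getD i []).set j (i : Int))) dc)
      (List.replicate row (List.replicate column 0))
    = pvMk m column ++ List.replicate (row - m) (List.replicate column 0) := by
  intro m
  induction m with
  | zero => intro row _; simp [pvMk]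
  | succ n ih =>
    intro row h
    have hn : n < row := h
    rw [List.range_succ, List.foldl_append, List.foldl_cons, List.foldl_nil,
      ih row (Nat.le_of_succ_le h)]
    have hmklen : (pvMk n column).length = n := by simp [pvMk]
    have hlen : (pvMk n column ++ List.replicate (row - n) (List.replicate column (0:Int))).length = row := by
      simp [pvMk]; omega
    rw [pvInner (fun _ => (n : Int)) n column _ (by rw [hlen]; exact hn)]
    have hrn : row - n = (row - n - 1) + 1 := by omega
    have hget : (pvMk n column ++ List.replicate (row - n) (List.replicate column (0:Int))).getD n []
        = List.replicate column (0:Int) := by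
      rw [List.getD, List.getElem?_append_right (by omega), hmklen]
      rw [hrn, List.replicate_succ]
      simp
    rw [hget, pvSetRow (n : Int) column _ (by simp)]
    rw [List.set_append_right _ _ (by omega), hmklen]
    obtain ⟨k, hk⟩ : ∃ k, row - n = k + 1 := ⟨row - n - 1, by omega⟩
    have hk2 : row - (n + 1) = k := by omega
    rw [hk, hk2, List.replicate_succ]
    simp [pvMk_succ]

theorem pvB_fold : ∀ (l : List String) (acc : List (List Int)) (r : List Int),
    (l.foldl (fun (st : List (List Int) × List Int) _ =>
        (st.1 ++ [st.2], st.2.map (fun v => v + 1))) (acc, r)).1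
      = acc ++ (List.range l.length).map (fun (i : Nat) => r.map (fun v => v + (i : Int))) := by
  intro l
  induction l with
  | nil => intro acc r; simp
  | cons a t ih =>
    intro acc r
    rw [List.foldl_cons, ih]
    rw [List.append_assoc]
    congr 1
    rw [List.length_cons, List.range_succ_eq_map]
    rw [List.map_cons]
    simp only [List.singleton_append]
    congr 1
    · simp
    · rw [List.map_map]
      apply List.map_congr_left
      intro i _
      simp only [Function.comp_apply, List.map_map]
      apply List.map_congr_left
      intro b _
      simp only [Function.comp_apply]
      push_cast
      ring

theorem pvA_char (x : List String) :
    dc_matrice_func x = pvMk x.length (x.headD "").toList.length := by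
  have hfun : (fun (dc : List (List Int)) (i : Nat) =>
      (List.range (x.headD "").toList.length).foldl (fun dc j =>
        dc.set i ((dc.getD i []).set j
          ((List.range i).foldl (fun step p =>
            step + del_func ((x.getD p "").toList.getD j ' ')) 0))) dc)
      = (fun (dc : List (List Int)) (i : Nat) =>
      (List.range (x.headD "").toList.length).foldl (fun dc j =>
        dc.set i ((dc.getD i []).set j (i : Int))) dc) := by
    funext dc i
    have hstep : ∀ j : Nat, (List.range i).foldl (fun step p =>
        step + del_func ((x.getD p "").toList.getD j ' ')) 0 = (i : Int) := by
      intro j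
      simp only [del_func]
      exact pvStep i
    simp only [hstep]
  simp only [dc_matrice_func]
  rw [pvInit, hfun, pvOuter _ x.length x.length le_rfl]
  simp

theorem pvB_char (x : List String) :
    dc_matrice_func_alt x = pvMk x.length (x.headD "").toList.length := by
  unfold dc_matrice_func_alt
  rw [pvB_fold]
  simp [pvMk, List.map_replicate]

-- ===== VERDICT (by name: the statement is the Claim_ definition above) =====
theorem dc_matrice_func_spec : Claim_equal_dc_matrice_func := by
  intro x _ _
  unfold Spec_dc_matrice_func
  rw [pvA_char, pvB_char]
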